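-- pv_equiv track=rewrite | github.com/XXanderWP/FivemDevelop | scripts/database.py | replace_strings
-- ===== SOURCE A (Python) =====
-- def replace_strings(text: str):
--     res = list()
--     for q in text.split('\n'):
--         if q.startswith(')'):
--             res.append(")")
--         else:
--             res.append(q)
--     return "\n".join(res)#.split(';')
-- ===== SOURCE B (Python) =====
-- def replace_strings(text: str):
--     # One-pass character scanner: tracks line starts and skips the rest of any
--     # line that begins with ')' after emitting a single ')'.
--     out = []
--     start = True   # at the beginning of a line
--     skip = False   # inside a line being replaced by ')'
--     for c in text:
--         if c == '\n':
--             out.append(c)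
--             start = True
--             skip = False
--         elif skip:
--             pass
--         elif start and c == ')':
--             out.append(')')
--             start = False
--             skip = True
--         else:
--             out.append(c)
--             start = False
--     return ''.join(out)
-- ===== Notes on version B (the rewrite author's own statement) =====
-- stated objective: alternative
-- what changed: A splits the text into a list of lines, rewrites each line starting with ')' in a loop, and rejoins with '\n'; B is a single-pass character state machine (at-line-start / skipping flags) that emits the output directly with no intermediate line list or join.
import Mathlib
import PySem

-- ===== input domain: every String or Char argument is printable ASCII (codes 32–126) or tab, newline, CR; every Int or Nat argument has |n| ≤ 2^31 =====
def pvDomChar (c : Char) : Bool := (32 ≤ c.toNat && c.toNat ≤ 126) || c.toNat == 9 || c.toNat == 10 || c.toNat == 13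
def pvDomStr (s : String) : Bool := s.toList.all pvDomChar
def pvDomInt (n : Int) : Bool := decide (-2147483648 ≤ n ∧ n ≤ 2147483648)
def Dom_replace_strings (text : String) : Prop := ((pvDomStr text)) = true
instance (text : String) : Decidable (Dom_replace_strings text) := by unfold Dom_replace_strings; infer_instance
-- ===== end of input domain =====

-- B replaces A's split/replace/join over a list of lines with a single-pass character
-- scanner (line-start / skip state machine); objective: alternative, no intermediate line list.

-- ===== PORT A =====
-- A: split on '\n', per line append ')' if it starts with ')' else the line, join with '\n'.
def replace_strings (text : String) : String :=
  let res : List (List Char) :=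
    (PySem.Chars.splitOn text.toList ['\n']).foldl
      (fun res q => res ++ [if PySem.Chars.startswith q [')'] then [')'] else q]) []
  String.mk (PySem.Chars.join ['\n'] res)

-- ===== PORT B =====
-- B: one fold over the characters; state = (output so far, reversed; at-line-start flag; skipping flag).
def altStep (st : List Char × Bool × Bool) (c : Char) : List Char × Bool × Bool :=
  if c = '\n' then (c :: st.1, true, false)
  else if st.2.2 then st
  else if st.2.1 && (c == ')') then (')' :: st.1, false, true)
  else (c :: st.1, false, st.2.2)

def replace_strings_alt (text : String) : String :=
  let fin := text.toList.foldl altStep ([], true, false)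
  String.mk fin.1.reverse

-- ===== PRECONDITION & SPEC =====
def Spec_replace_strings (text : String) (out : String) : Prop := out = replace_strings_alt text
instance (text : String) (out : String) : Decidable (Spec_replace_strings text out) := by unfold Spec_replace_strings; infer_instance

-- ===== CLAIM (what is proved, stated in full; the proofs are below) =====
def Claim_equal_replace_strings : Prop := ∀ (text : String), Dom_replace_strings text → Spec_replace_strings text (replace_strings text)

-- ===== LEMMAS AND PROOFS =====

-- Reference splitter: Python's text.split('\n') with the pending piece as accumulator.
def split1 (pre : List Char) : List Char → List (List Char)
  | [] => [pre]
  | c :: r => if c = '\n' then pre :: split1 [] r else split1 (pre ++ [c]) r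

-- Reference emitter: what B's state machine outputs from a given state.
def emit (start skip : Bool) : List Char → List Char
  | [] => []
  | c :: r =>
    if c = '\n' then '\n' :: emit true false r
    else if skip then emit start skip r
    else if start && (c == ')') then ')' :: emit false true r
    else c :: emit false skip r

-- A's per-line replacement.
def lineF (q : List Char) : List Char :=
  if PySem.Chars.startswith q [')'] then [')'] else q

lemma split1_ne_nil (pre l : List Char) : split1 pre l ≠ [] := by
  induction l generalizing pre with
  | nil => simp [split1]
  | cons c r ih =>
    simp only [split1]
    split_ifs
    · simp
    · exact ih _

lemma Lgo : ∀ (l : List Char) (fuel : Nat) (cur : List Char) (acc : List (List Char)),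
    l.length < fuel →
    PySem.Chars.splitOn.go ['\n'] fuel l cur acc = acc.reverse ++ split1 cur.reverse l := by
  intro l
  induction l with
  | nil =>
    intro fuel cur acc h
    cases fuel with
    | zero => omega
    | succ f => simp [PySem.Chars.splitOn.go, split1]
  | cons c r ih =>
    intro fuel cur acc h
    cases fuel with
    | zero => simp at h
    | succ f =>
      rw [PySem.Chars.splitOn.go]
      by_cases hc : c = '\n'
      · subst hc
        simp only [List.length_cons] at h
        rw [show (['\n'].isPrefixOf ('\n' :: r)) = true from by simp [List.isPrefixOf]]
        simp only [if_true, List.length_cons, List.length_nil, List.drop_succ_cons,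
          List.drop_zero]
        rw [ih f [] (cur.reverse :: acc) (by omega)]
        simp [split1]
      · rw [show (['\n'].isPrefixOf (c :: r)) = false by
          simp [List.isPrefixOf]; exact fun h' => absurd h'.symm hc]
        simp only [Bool.false_eq_true, ite_false]
        rw [ih f (c :: cur) acc (by simp at h ⊢; omega)]
        simp [split1, hc]

lemma splitOn_eq (l : List Char) :
    PySem.Chars.splitOn l ['\n'] = split1 [] l := by
  show PySem.Chars.splitOn.go ['\n'] (l.length + 1) l [] [] = _
  rw [Lgo l (l.length + 1) [] [] (by omega)]
  simp

lemma lineF_head (q : List Char) :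
    lineF q = if q.head? = some ')' then [')'] else q := by
  cases q with
  | nil => simp [lineF, PySem.Chars.startswith, List.isPrefixOf]
  | cons c r =>
    simp only [lineF, PySem.Chars.startswith, List.isPrefixOf, List.head?_cons]
    by_cases hc : c = ')'
    · subst hc; simp
    · simp [hc, Ne.symm hc]

-- B's fold computes emit.
lemma foldl_altStep (l : List Char) : ∀ (rev : List Char) (start skip : Bool),
    (l.foldl altStep (rev, start, skip)).1 = (emit start skip l).reverse ++ rev := by
  induction l with
  | nil => intro rev start skip; simp [emit]
  | cons c r ih =>
    intro rev start skip
    by_cases hn : c = '\n'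
    · subst hn
      show (r.foldl altStep (altStep (rev, start, skip) '\n')).1 = _
      rw [show altStep (rev, start, skip) '\n' = ('\n' :: rev, true, false) from by
        simp [altStep]]
      rw [ih]
      simp [emit]
    · cases hs : skip with
      | true =>
        show (r.foldl altStep (altStep (rev, start, true) c)).1 = _
        rw [show altStep (rev, start, true) c = (rev, start, true) from by simp [altStep, hn]]
        rw [ih]
        simp [emit, hn]
      | false =>
        by_cases hp : start = true ∧ c = ')'
        · obtain ⟨hst, hc⟩ := hp; subst hst; subst hc
          show (r.foldl altStep (altStep (rev, true, false) ')')).1 = _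
          rw [show altStep (rev, true, false) ')' = (')' :: rev, false, true) from by
            simp [altStep, hn]]
          rw [ih]
          simp [emit, hn]
        · have hb : (start && (c == ')')) = false := by cases start <;> simp_all
          show (r.foldl altStep (altStep (rev, start, false) c)).1 = _
          rw [show altStep (rev, start, false) c = (c :: rev, false, false) from by
            simp [altStep, hn, hb]]
          rw [ih]
          simp [emit, hn, hb]

-- Joining A's mapped lines equals B's emission, for every pending-line state.
lemma key (l : List Char) : ∀ (pre : List Char),
    PySem.Chars.join ['\n'] ((split1 pre l).map lineF)
      = lineF pre ++ emit pre.isEmpty (pre.head? == some ')') l := by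
  induction l with
  | nil =>
    intro pre
    simp [split1, emit, PySem.Chars.join, List.intercalate]
  | cons c r ih =>
    intro pre
    by_cases hn : c = '\n'
    · subst hn
      rw [show split1 pre ('\n' :: r) = pre :: split1 [] r from by simp [split1]]
      rw [show emit pre.isEmpty (pre.head? == some ')') ('\n' :: r)
            = '\n' :: emit true false r from by simp [emit]]
      obtain ⟨x, xs, hx⟩ := List.exists_cons_of_ne_nil (split1_ne_nil [] r)
      have hjoin : PySem.Chars.join ['\n'] (lineF pre :: (split1 [] r).map lineF)
          = lineF pre ++ '\n' :: PySem.Chars.join ['\n'] ((split1 [] r).map lineF) := by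
        rw [hx, List.map_cons, PySem.Chars.join_cons_cons]
        simp
      rw [List.map_cons, hjoin, ih []]
      simp [lineF, PySem.Chars.startswith, List.isPrefixOf]
    · simp only [split1, hn, ite_false, emit]
      rw [ih (pre ++ [c])]
      cases pre with
      | nil =>
        by_cases hc : c = ')'
        · subst hc
          simp [lineF_head]
        · have hcb : (c == ')') = false := by simp [hc]
          simp [lineF_head, hc, hcb]
      | cons p ps =>
        simp only [List.cons_append, List.head?_cons, List.isEmpty_cons]
        by_cases hp : p = ')'
        · subst hp
          simp [lineF_head]
        · simp only [lineF_head, List.head?_cons]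
          have : ((p == ')') : Bool) = false := by simp [hp]
          simp [hp, this]

lemma emit_eq_join (l : List Char) :
    PySem.Chars.join ['\n'] ((split1 [] l).map lineF) = emit true false l := by
  rw [key l []]
  simp [lineF, PySem.Chars.startswith, List.isPrefixOf]

-- ===== VERDICT (by name: the statement is the Claim_ definition above) =====
theorem replace_strings_spec : Claim_equal_replace_strings := by
  intro text _
  unfold Spec_replace_strings replace_strings replace_strings_alt
  dsimp only
  rw [splitOn_eq, PySem.List.foldl_append_singleton_eq_map]
  rw [foldl_altStep text.toList [] true false]
  simp only [List.append_nil, List.nil_append, List.reverse_reverse]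
  rw [show (fun q => if PySem.Chars.startswith q [')'] = true then [')'] else q) = lineF from rfl]
  rw [emit_eq_join]
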